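-- pv_equiv track=rewrite | github.com/ZePedroFernandes/ASI | Aula5/Stats.py | URLmaisVisitado
-- ===== SOURCE A (Python) =====
-- def URLmaisVisitado(url: dict):
--     most_visited_url = []
--     most_visited_url_visits = 0
--
--     for key, dates in url.items():
--         url = key
--         dates = dict(dates)
--         url_visits = 0
--         for value in dates.values():
--             url_visits = url_visits + len(value)
--
--         if url_visits > most_visited_url_visits:
--             most_visited_url = [url]
--             most_visited_url_visits = url_visits
--         elif url_visits == most_visited_url_visits:
--             most_visited_url.append(url)
--
--     return most_visited_url
-- ===== SOURCE B (Python) =====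
-- def URLmaisVisitado(url: dict):
--     totals = [(key, sum(len(v) for v in dict(dates).values()))
--               for key, dates in url.items()]
--     if not totals:
--         return []
--     m = max(t for _, t in totals)
--     return [k for k, t in totals if t == m]
-- ===== Notes on version B (the rewrite author's own statement) =====
-- stated objective: simpler
-- what changed: Replaces A's running-max loop with tie-append and reset by building a (key, total) table in one comprehension, then taking the max total and filtering the table for keys that reach it.
import Mathlib
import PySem

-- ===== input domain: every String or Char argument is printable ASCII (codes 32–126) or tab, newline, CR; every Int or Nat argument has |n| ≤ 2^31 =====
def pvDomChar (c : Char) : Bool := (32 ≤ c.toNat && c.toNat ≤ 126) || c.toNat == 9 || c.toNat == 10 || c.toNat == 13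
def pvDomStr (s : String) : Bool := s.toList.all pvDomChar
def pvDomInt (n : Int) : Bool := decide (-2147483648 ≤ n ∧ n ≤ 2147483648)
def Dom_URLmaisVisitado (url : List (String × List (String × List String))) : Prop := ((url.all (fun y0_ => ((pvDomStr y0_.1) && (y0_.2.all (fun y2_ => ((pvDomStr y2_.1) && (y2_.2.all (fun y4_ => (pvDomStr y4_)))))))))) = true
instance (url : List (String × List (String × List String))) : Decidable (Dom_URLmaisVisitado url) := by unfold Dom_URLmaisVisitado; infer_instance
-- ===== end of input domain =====

-- B builds the (key, total-visits) table in one pass, then takes the max and filters,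
-- instead of A's running-max/tie-append loop; objective: simpler (same O(n) cost).

-- ===== PORT A =====
-- A's running-max loop: state = (most_visited_url, most_visited_url_visits)
def URLmaisVisitado (url : List (String × List (String × List String))) : List String :=
  (url.foldl (fun (st : List String × Int) kd =>
      let dates := PySem.Dict.ofList kd.2
      let urlVisits := dates.values.foldl (fun acc v => acc + (v.length : Int)) 0
      if st.2 < urlVisits then ([kd.1], urlVisits)
      else if urlVisits = st.2 then (st.1 ++ [kd.1], st.2)
      else st) ([], 0)).1

-- ===== PORT B =====
-- sum(len(v) for v in dict(dates).values())
def pvTotalVisits (dates : List (String × List String)) : Int :=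
  ((PySem.Dict.ofList dates).values.map (fun v => (v.length : Int))).sum

def URLmaisVisitado_alt (url : List (String × List (String × List String))) : List String :=
  let totals := url.map (fun kd => (kd.1, pvTotalVisits kd.2))
  match PySem.List.max? (totals.map (fun kt => kt.2)) (fun t => t) with
  | none => []    -- 'if not totals: return []' (max? is none exactly on the empty table)
  | some m => (totals.filter (fun kt => kt.2 = m)).map (fun kt => kt.1)

-- ===== PRECONDITION & SPEC =====
def Spec_URLmaisVisitado (url : List (String × List (String × List String))) (out : List String) : Prop := out = URLmaisVisitado_alt url
instance (url : List (String × List (String × List String))) (out : List String) : Decidable (Spec_URLmaisVisitado url out) := by unfold Spec_URLmaisVisitado; infer_instance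

-- ===== CLAIM (what is proved, stated in full; the proofs are below) =====
def Claim_equal_URLmaisVisitado : Prop := ∀ (url : List (String × List (String × List String))), Dom_URLmaisVisitado url → Spec_URLmaisVisitado url (URLmaisVisitado url)

-- ===== LEMMAS AND PROOFS =====

-- A's inner accumulation loop computes B's sum
lemma foldl_add_len (l : List (List String)) (c : Int) :
    l.foldl (fun acc v => acc + (v.length : Int)) c = c + (l.map (fun v => (v.length : Int))).sum := by
  induction l generalizing c with
  | nil => simp
  | cons x t ih => simp [List.foldl_cons, ih]; ring

lemma totalVisits_nonneg (dates : List (String × List String)) : 0 ≤ pvTotalVisits dates := by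
  unfold pvTotalVisits
  apply List.sum_nonneg
  intro x hx
  simp at hx
  obtain ⟨v, _, rfl⟩ := hx
  positivity

-- A's step function, re-expressed via pvTotalVisits
def pvStepA (st : List String × Int) (kd : String × List (String × List String)) : List String × Int :=
  if st.2 < pvTotalVisits kd.2 then ([kd.1], pvTotalVisits kd.2)
  else if pvTotalVisits kd.2 = st.2 then (st.1 ++ [kd.1], st.2)
  else st

lemma URLmaisVisitado_eq_stepA (url : List (String × List (String × List String))) :
    URLmaisVisitado url = (url.foldl pvStepA ([], 0)).1 := by
  unfold URLmaisVisitado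
  suffices h : ∀ (l : List (String × List (String × List String))) (st : List String × Int),
      l.foldl (fun (st : List String × Int) kd =>
        let dates := PySem.Dict.ofList kd.2
        let urlVisits := dates.values.foldl (fun acc v => acc + (v.length : Int)) 0
        if st.2 < urlVisits then ([kd.1], urlVisits)
        else if urlVisits = st.2 then (st.1 ++ [kd.1], st.2)
        else st) st = l.foldl pvStepA st by
    rw [h]
  intro l
  induction l with
  | nil => intro st; rfl
  | cons kd t ih =>
    intro st
    simp only [List.foldl_cons, ih]
    congr 1
    simp only [pvStepA, pvTotalVisits, foldl_add_len, zero_add]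
    rfl

-- pushing the filter/map through B's totals table
lemma filtmap (l : List (String × List (String × List String))) (M : Int) :
    ((l.map (fun kd => (kd.1, pvTotalVisits kd.2))).filter (fun kt => decide (kt.2 = M))).map (fun kt => kt.1)
      = (l.filter (fun kd => decide (pvTotalVisits kd.2 = M))).map (fun kd => kd.1) := by
  induction l with
  | nil => rfl
  | cons kd t ih =>
    simp only [List.map_cons, List.filter_cons]
    by_cases h : pvTotalVisits kd.2 = M
    · simp [h, ih]
    · simp [h, ih]

-- characterisation of A's running-max/tie-append loop
lemma stepA_loop (l : List (String × List (String × List String))) (acc : List String) (m : Int) :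
    l.foldl pvStepA (acc, m) =
      ((if m = l.foldl (fun c kd => max c (pvTotalVisits kd.2)) m then acc else []) ++
        (l.filter (fun kd => pvTotalVisits kd.2 = l.foldl (fun c kd => max c (pvTotalVisits kd.2)) m)).map (fun kd => kd.1),
       l.foldl (fun c kd => max c (pvTotalVisits kd.2)) m) := by
  induction l generalizing acc m with
  | nil => simp
  | cons kd t ih =>
    have hle := (PySem.List.le_foldl_max_int t (fun kd => pvTotalVisits kd.2) (max m (pvTotalVisits kd.2))).1
    simp only [List.foldl_cons]
    by_cases h1 : m < pvTotalVisits kd.2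
    · have hmax : max m (pvTotalVisits kd.2) = pvTotalVisits kd.2 := by omega
      rw [show pvStepA (acc, m) kd = ([kd.1], pvTotalVisits kd.2) by simp [pvStepA, h1]]
      rw [ih]
      simp only [hmax] at hle ⊢
      simp only [List.filter_cons, decide_eq_true_eq]
      have hmM : ¬ m = t.foldl (fun c kd => max c (pvTotalVisits kd.2)) (pvTotalVisits kd.2) := by
        intro h; omega
      rw [if_neg hmM]
      by_cases h2 : pvTotalVisits kd.2 = t.foldl (fun c kd => max c (pvTotalVisits kd.2)) (pvTotalVisits kd.2)
      · rw [if_pos h2, if_pos h2]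
        simp
      · rw [if_neg h2, if_neg h2]
    · have hmax : max m (pvTotalVisits kd.2) = m := by omega
      simp only [hmax] at hle ⊢
      by_cases h2 : pvTotalVisits kd.2 = m
      · rw [show pvStepA (acc, m) kd = (acc ++ [kd.1], m) by simp [pvStepA, h2]]
        rw [ih]
        simp only [List.filter_cons, decide_eq_true_eq]
        by_cases h3 : m = t.foldl (fun c kd => max c (pvTotalVisits kd.2)) m
        · rw [if_pos h3, if_pos h3, if_pos (h2.trans h3)]
          simp
        · rw [if_neg h3, if_neg h3, if_neg (fun h => h3 (h2.symm.trans h))]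
      · rw [show pvStepA (acc, m) kd = (acc, m) by simp [pvStepA, h1, h2]]
        rw [ih]
        simp only [List.filter_cons, decide_eq_true_eq]
        have hne : ¬ pvTotalVisits kd.2 = t.foldl (fun c kd => max c (pvTotalVisits kd.2)) m := by
          intro h; omega
        rw [if_neg hne]

-- ===== VERDICT (by name: the statement is the Claim_ definition above) =====
theorem URLmaisVisitado_spec : Claim_equal_URLmaisVisitado := by
  intro url _
  unfold Spec_URLmaisVisitado URLmaisVisitado_alt
  rw [URLmaisVisitado_eq_stepA, stepA_loop]
  cases url with
  | nil => simp [PySem.List.max?]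
  | cons kd t =>
    have h0 : max (0 : Int) (pvTotalVisits kd.2) = pvTotalVisits kd.2 :=
      max_eq_right (totalVisits_nonneg kd.2)
    simp only [List.map_cons]
    rw [PySem.List.max?_id_cons]
    simp only [List.foldl_cons, List.foldl_map, h0, ite_self, List.nil_append]
    have h := filtmap (kd :: t) (t.foldl (fun c kd => max c (pvTotalVisits kd.2)) (pvTotalVisits kd.2))
    simp only [List.map_cons] at h
    exact h.symm
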